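-- pv_equiv track=rewrite | github.com/D9veth/projects | cryptoanalyse.py | contfrac_to_rational
-- ===== SOURCE A (Python) =====
-- def contfrac_to_rational (frac):
--     if len(frac) == 0:
--         return (0,1)
--     num = frac[-1]
--     denom = 1
--     for i in range(-2,-len(frac)-1,-1):
--         num, denom = frac[i]*num+denom, num
--     return (num,denom)
-- ===== SOURCE B (Python) =====
-- def contfrac_to_rational(frac):
--     if not frac:
--         return (0, 1)
--     h, h2 = 1, 0
--     k, k2 = 0, 1
--     for a in frac:
--         h, h2 = a * h + h2, h
--         k, k2 = a * k + k2, k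
--     return (h, k)
-- ===== Notes on version B (the rewrite author's own statement) =====
-- stated objective: alternative
-- what changed: Replaces the backward right-to-left fold over negative indices with the standard forward convergent recurrence h=a*h+h_prev, k=a*k+k_prev traversing the list front-to-back.
import Mathlib
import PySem

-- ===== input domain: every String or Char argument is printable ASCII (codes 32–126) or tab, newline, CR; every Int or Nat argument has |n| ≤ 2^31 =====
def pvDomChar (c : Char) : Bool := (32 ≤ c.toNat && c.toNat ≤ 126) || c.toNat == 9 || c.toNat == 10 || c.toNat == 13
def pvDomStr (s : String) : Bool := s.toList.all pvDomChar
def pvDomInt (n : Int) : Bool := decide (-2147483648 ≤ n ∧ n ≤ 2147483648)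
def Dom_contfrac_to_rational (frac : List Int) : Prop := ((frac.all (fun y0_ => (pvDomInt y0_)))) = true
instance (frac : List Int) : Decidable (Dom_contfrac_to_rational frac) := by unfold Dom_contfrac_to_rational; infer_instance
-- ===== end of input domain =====

-- B computes the convergent by the standard forward recurrence (front-to-back) instead of
-- A's backward fold over negative indices; same O(n) cost, different decomposition.

-- ===== PORT A =====
def contfrac_to_rational (frac : List Int) : Int × Int :=
  if frac.length = 0 then (0, 1)
  else
    (PySem.List.pyRange (-2) (-(frac.length : Int) - 1) (-1)).foldl
      (fun (s : Int × Int) i => (PySem.List.pyGetD frac i 0 * s.1 + s.2, s.1))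
      (PySem.List.pyGetD frac (-1) 0, 1)

-- ===== PORT B =====
def contfrac_to_rational_alt (frac : List Int) : Int × Int :=
  if frac = [] then (0, 1)
  else
    let s := frac.foldl
      (fun (t : Int × Int × Int × Int) a =>
        (a * t.1 + t.2.1, t.1, a * t.2.2.1 + t.2.2.2, t.2.2.1))
      (1, 0, 0, 1)
    (s.1, s.2.2.1)

-- ===== PRECONDITION & SPEC =====
def Spec_contfrac_to_rational (frac : List Int) (out : Int × Int) : Prop := out = contfrac_to_rational_alt frac
instance (frac : List Int) (out : Int × Int) : Decidable (Spec_contfrac_to_rational frac out) := by unfold Spec_contfrac_to_rational; infer_instance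

-- ===== CLAIM (what is proved, stated in full; the proofs are below) =====
def Claim_equal_contfrac_to_rational : Prop := ∀ (frac : List Int), Dom_contfrac_to_rational frac → Spec_contfrac_to_rational frac (contfrac_to_rational frac)

-- ===== LEMMAS AND PROOFS =====

-- the backward (continued-fraction) recurrence both programs compute
def cfBack (L : List Int) : Int × Int :=
  L.foldr (fun a (s : Int × Int) => (a * s.1 + s.2, s.1)) (1, 0)

-- the elements A's loop visits, in order, are the initial segment reversed
lemma cfA_elems (l : List Int) (x : Int) :
    (List.range l.length).map (fun (k : Nat) => PySem.List.pyGetD (l ++ [x]) (-2 - (k : Int)) 0)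
      = l.reverse := by
  apply List.ext_getElem
  · simp
  · intro k hk hk'
    simp only [List.length_map, List.length_range] at hk
    rw [List.getElem_map, List.getElem_range, List.getElem_reverse]
    have h1 : (-2 - (k : Int)) = -((k + 2 : Nat) : Int) := by push_cast; ring
    rw [h1, PySem.List.pyGetD_neg_natCast (l ++ [x]) (k + 2) 0 (by omega) (by simp; omega)]
    rw [List.getElem_append_left (by simp; omega)]
    congr 1
    simp
    omega

-- A on a nonempty list computes the backward fold
lemma cfA_eq (l : List Int) (x : Int) :
    contfrac_to_rational (l ++ [x]) = cfBack (l ++ [x]) := by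
  unfold contfrac_to_rational
  rw [if_neg (by simp)]
  have hlen : (-2 : Int) - (-((l ++ [x]).length : Int) - 1) = (l.length : Int) := by
    simp; ring
  rw [PySem.List.pyRange_neg_one, hlen, Int.toNat_natCast]
  rw [List.foldl_map]
  rw [← List.foldl_map (f := fun (k : Nat) => PySem.List.pyGetD (l ++ [x]) (-2 - (k : Int)) 0)
        (g := fun (s : Int × Int) a => (a * s.1 + s.2, s.1))]
  rw [cfA_elems, PySem.List.pyGetD_neg_one_append_singleton]
  rw [List.foldl_reverse]
  unfold cfBack
  rw [List.foldr_append]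
  simp

-- B's forward state, projected, is a linear combination of the backward fold
lemma cfB_fwd (L : List Int) : ∀ (h h2 k k2 : Int),
    (((L.foldl
      (fun (t : Int × Int × Int × Int) a =>
        (a * t.1 + t.2.1, t.1, a * t.2.2.1 + t.2.2.2, t.2.2.1))
      (h, h2, k, k2)).1,
     (L.foldl
      (fun (t : Int × Int × Int × Int) a =>
        (a * t.1 + t.2.1, t.1, a * t.2.2.1 + t.2.2.2, t.2.2.1))
      (h, h2, k, k2)).2.2.1)
      = (h * (cfBack L).1 + h2 * (cfBack L).2, k * (cfBack L).1 + k2 * (cfBack L).2)) := by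
  induction L with
  | nil => intro h h2 k k2; simp [cfBack]
  | cons a t ih =>
      intro h h2 k k2
      simp only [List.foldl_cons]
      rw [ih]
      simp only [cfBack, List.foldr_cons]
      simp only [Prod.mk.injEq]
      constructor <;> ring

lemma cfB_eq (L : List Int) (hL : L ≠ []) :
    contfrac_to_rational_alt L = cfBack L := by
  unfold contfrac_to_rational_alt
  rw [if_neg hL]
  show (_, _) = _
  rw [cfB_fwd]
  simp

-- ===== VERDICT (by name: the statement is the Claim_ definition above) =====
theorem contfrac_to_rational_spec : Claim_equal_contfrac_to_rational := by
  intro frac _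
  unfold Spec_contfrac_to_rational
  rcases frac.eq_nil_or_concat with rfl | ⟨l, x, rfl⟩
  · rfl
  · rw [List.concat_eq_append, cfA_eq, cfB_eq _ (by simp)]
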